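-- pv_equiv track=rewrite | github.com/Zhenxi-Lin/grounded-engineering-document-workflow-agent | app/retrieval/query_router.py | infer_preferred_sources
-- ===== SOURCE A (Python) =====
-- def infer_preferred_sources(query: str) -> list[str]:
--     sources: list[str] = []
--
--     if "isaac ros" in query:
--         sources.append("Isaac ROS docs")
--     if "moveit" in query:
--         sources.append("MoveIt docs")
--     if "px4" in query:
--         sources.append("PX4 official docs")
--     if any(term in query for term in ["ros 2", "ros2"]):
--         sources.append("ROS 2 official docs")
--
--     if any(term in query for term in ["qgroundcontrol", "uxrce", "uorb", "failsafe", "offboard"]):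
--         sources.append("PX4 official docs")
--     if any(term in query for term in ["colcon", "qos", "discovery", "ros2doctor"]):
--         sources.append("ROS 2 official docs")
--     if any(term in query for term in ["planning scene", "moveitcpp", "rviz", "controller configuration"]):
--         sources.append("MoveIt docs")
--     if any(term in query for term in ["isaac", "nitros", "cumotion", "visual slam", "jetson", "dgx"]):
--         sources.append("Isaac ROS docs")
--
--     if not sources:
--         if any(term in query for term in ["motion planning", "planning results", "planning"]):
--             sources.append("MoveIt docs")
--         elif any(term in query for term in ["supported platform", "accelerated", "cuda"]):
--             sources.append("Isaac ROS docs")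
--
--     return dedupe_preserve_order(sources)
--
-- def dedupe_preserve_order(items: list[str]) -> list[str]:
--     seen: set[str] = set()
--     result: list[str] = []
--     for item in items:
--         if item in seen:
--             continue
--         seen.add(item)
--         result.append(item)
--     return result
-- ===== SOURCE B (Python) =====
-- # Different algorithm: instead of appending labels in rule order and deduping,
-- # group the rules BY LABEL, compute the first (minimal) matching rule index per
-- # label, and sort the hit labels by that index.  Correct because A's
-- # dedupe_preserve_order keeps each label at its first occurrence, i.e. orders
-- # labels by the index of their first matching rule.  No dedupe pass is needed.
-- LABEL_RULES = {
--     "Isaac ROS docs": [(0, ["isaac ros"]),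
--                        (7, ["isaac", "nitros", "cumotion", "visual slam", "jetson", "dgx"])],
--     "MoveIt docs": [(1, ["moveit"]),
--                     (6, ["planning scene", "moveitcpp", "rviz", "controller configuration"])],
--     "PX4 official docs": [(2, ["px4"]),
--                           (4, ["qgroundcontrol", "uxrce", "uorb", "failsafe", "offboard"])],
--     "ROS 2 official docs": [(3, ["ros 2", "ros2"]),
--                             (5, ["colcon", "qos", "discovery", "ros2doctor"])],
-- }
--
-- FALLBACK = [
--     (["motion planning", "planning results", "planning"], "MoveIt docs"),
--     (["supported platform", "accelerated", "cuda"], "Isaac ROS docs"),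
-- ]
--
--
-- def infer_preferred_sources(query: str) -> list[str]:
--     hits: list[tuple[int, str]] = []
--     for label, rules in LABEL_RULES.items():
--         idxs = [i for i, terms in rules if any(t in query for t in terms)]
--         if idxs:
--             hits.append((min(idxs), label))
--     if hits:
--         hits.sort(key=lambda h: h[0])
--         return [label for _, label in hits]
--     for terms, label in FALLBACK:
--         if any(t in query for t in terms):
--             return [label]
--     return []
-- ===== Notes on version B (the rewrite author's own statement) =====
-- stated objective: alternative
-- what changed: Instead of appending labels in rule order and deduping with a seen-set, B groups the rules by label in a dict, computes the minimal matching rule index per label, and sorts the hit labels by that index, so no dedupe pass exists; the first-match fallback becomes an early-return loop.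
import Mathlib
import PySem

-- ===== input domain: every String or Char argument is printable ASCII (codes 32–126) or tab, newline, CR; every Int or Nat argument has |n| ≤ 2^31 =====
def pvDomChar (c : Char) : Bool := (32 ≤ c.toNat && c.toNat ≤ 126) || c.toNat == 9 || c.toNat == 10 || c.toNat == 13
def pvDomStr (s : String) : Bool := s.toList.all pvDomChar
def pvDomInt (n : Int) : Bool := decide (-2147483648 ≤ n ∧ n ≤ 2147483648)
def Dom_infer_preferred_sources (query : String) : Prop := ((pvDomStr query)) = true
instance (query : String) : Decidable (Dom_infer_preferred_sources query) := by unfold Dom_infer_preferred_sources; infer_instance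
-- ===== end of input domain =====

-- B groups the rules BY LABEL, computes the first (minimal) matching rule index per label,
-- and sorts the hit labels by that index — no append sequence and no dedupe pass; idiomatic, same cost.


-- ===== PORT A =====
-- dedupe_preserve_order: seen-set + result-list loop, transliterated.
def dedupe_preserve_order (items : List String) : List String :=
  (items.foldl
    (fun (st : PySem.Set String × List String) item =>
      if PySem.Set.contains st.1 item then st
      else (PySem.Set.add st.1 item, st.2 ++ [item]))
    (PySem.Set.empty, [])).2

def infer_preferred_sources (query : String) : List String :=
  let sources : List String := []
  let sources := if PySem.Str.isIn "isaac ros" query then sources ++ ["Isaac ROS docs"] else sources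
  let sources := if PySem.Str.isIn "moveit" query then sources ++ ["MoveIt docs"] else sources
  let sources := if PySem.Str.isIn "px4" query then sources ++ ["PX4 official docs"] else sources
  let sources := if (["ros 2", "ros2"].any fun t => PySem.Str.isIn t query) then sources ++ ["ROS 2 official docs"] else sources
  let sources := if (["qgroundcontrol", "uxrce", "uorb", "failsafe", "offboard"].any fun t => PySem.Str.isIn t query) then sources ++ ["PX4 official docs"] else sources
  let sources := if (["colcon", "qos", "discovery", "ros2doctor"].any fun t => PySem.Str.isIn t query) then sources ++ ["ROS 2 official docs"] else sources
  let sources := if (["planning scene", "moveitcpp", "rviz", "controller configuration"].any fun t => PySem.Str.isIn t query) then sources ++ ["MoveIt docs"] else sources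
  let sources := if (["isaac", "nitros", "cumotion", "visual slam", "jetson", "dgx"].any fun t => PySem.Str.isIn t query) then sources ++ ["Isaac ROS docs"] else sources
  let sources :=
    if sources = [] then
      if (["motion planning", "planning results", "planning"].any fun t => PySem.Str.isIn t query) then sources ++ ["MoveIt docs"]
      else if (["supported platform", "accelerated", "cuda"].any fun t => PySem.Str.isIn t query) then sources ++ ["Isaac ROS docs"]
      else sources
    else sources
  dedupe_preserve_order sources

-- ===== PORT B =====
def pvLabelRules : List (String × List (Int × List String)) :=
  [("Isaac ROS docs", [(0, ["isaac ros"]),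
                       (7, ["isaac", "nitros", "cumotion", "visual slam", "jetson", "dgx"])]),
   ("MoveIt docs", [(1, ["moveit"]),
                    (6, ["planning scene", "moveitcpp", "rviz", "controller configuration"])]),
   ("PX4 official docs", [(2, ["px4"]),
                          (4, ["qgroundcontrol", "uxrce", "uorb", "failsafe", "offboard"])]),
   ("ROS 2 official docs", [(3, ["ros 2", "ros2"]),
                            (5, ["colcon", "qos", "discovery", "ros2doctor"])])]

def pvFallback : List (List String × String) :=
  [(["motion planning", "planning results", "planning"], "MoveIt docs"),
   (["supported platform", "accelerated", "cuda"], "Isaac ROS docs")]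

-- the 'for terms, label in FALLBACK: if any(...): return [label]' loop
def pvFallbackScan (query : String) : List (List String × String) → List String
  | [] => []
  | (terms, label) :: rest =>
      if terms.any (fun t => PySem.Str.isIn t query) then [label]
      else pvFallbackScan query rest

def infer_preferred_sources_alt (query : String) : List String :=
  let hits : List (Int × String) :=
    pvLabelRules.foldl
      (fun hits lr =>
        let idxs := (lr.2.filter (fun r => r.2.any fun t => PySem.Str.isIn t query)).map (·.1)
        match PySem.List.min? idxs (fun x => x) with
        | some m => hits ++ [(m, lr.1)]
        | none => hits)
      []
  if hits ≠ [] then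
    (PySem.List.sorted hits (fun h => h.1) false).map (·.2)
  else
    pvFallbackScan query pvFallback

-- ===== PRECONDITION & SPEC =====
def Spec_infer_preferred_sources (query : String) (out : List String) : Prop := out = infer_preferred_sources_alt query
instance (query : String) (out : List String) : Decidable (Spec_infer_preferred_sources query out) := by unfold Spec_infer_preferred_sources; infer_instance

-- ===== CLAIM (what is proved, stated in full; the proofs are below) =====
def Claim_equal_infer_preferred_sources : Prop := ∀ (query : String), Dom_infer_preferred_sources query → Spec_infer_preferred_sources query (infer_preferred_sources query)

-- ===== LEMMAS AND PROOFS =====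

-- Both programs are functions of the ten grouped substring tests; generalize them and decide the 2^10 cases.
theorem infer_key (query : String) :
    infer_preferred_sources query = infer_preferred_sources_alt query := by
  simp only [infer_preferred_sources, infer_preferred_sources_alt, pvLabelRules, pvFallback,
    pvFallbackScan, List.foldl_cons, List.foldl_nil, List.filter_cons, List.filter_nil,
    List.any_cons, List.any_nil, Bool.or_false]
  generalize PySem.Str.isIn "isaac ros" query = b1
  generalize PySem.Str.isIn "moveit" query = b2
  generalize PySem.Str.isIn "px4" query = b3
  generalize (PySem.Str.isIn "ros 2" query || PySem.Str.isIn "ros2" query) = b4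
  generalize (PySem.Str.isIn "qgroundcontrol" query || (PySem.Str.isIn "uxrce" query || (PySem.Str.isIn "uorb" query || (PySem.Str.isIn "failsafe" query || PySem.Str.isIn "offboard" query)))) = b5
  generalize (PySem.Str.isIn "colcon" query || (PySem.Str.isIn "qos" query || (PySem.Str.isIn "discovery" query || PySem.Str.isIn "ros2doctor" query))) = b6
  generalize (PySem.Str.isIn "planning scene" query || (PySem.Str.isIn "moveitcpp" query || (PySem.Str.isIn "rviz" query || PySem.Str.isIn "controller configuration" query))) = b7
  generalize (PySem.Str.isIn "isaac" query || (PySem.Str.isIn "nitros" query || (PySem.Str.isIn "cumotion" query || (PySem.Str.isIn "visual slam" query || (PySem.Str.isIn "jetson" query || PySem.Str.isIn "dgx" query))))) = b8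
  generalize (PySem.Str.isIn "motion planning" query || (PySem.Str.isIn "planning results" query || PySem.Str.isIn "planning" query)) = b9
  generalize (PySem.Str.isIn "supported platform" query || (PySem.Str.isIn "accelerated" query || PySem.Str.isIn "cuda" query)) = b10
  revert b1 b2 b3 b4 b5 b6 b7 b8 b9 b10
  decide

-- ===== VERDICT (by name: the statement is the Claim_ definition above) =====
theorem infer_preferred_sources_spec : Claim_equal_infer_preferred_sources := by
  intro query _
  unfold Spec_infer_preferred_sources
  exact infer_key query
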